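-- pv_equiv track=rewrite | github.com/sanntana21/image_feature_extraction | LBPUDescriptor.py | _uniform_neighborhood_comparation
-- ===== SOURCE A (Python) =====
-- def _uniform_neighborhood_comparation(window_list_values: list, pixel_value: int) -> int:
--     """
--     Para una ventana en formato lista de valores y el valor del píxel central, se calcula el valor decimal
--     correspondiente al valor binario resultante de LBP Uniforme.
--     x1y1 x1y2 x1y3
--     x2y1 x2y2 x2y3 -> [x1y1, x1y2, x1y3, x2y1 ,x2y2 ,x2y3 ,x3y1 ,x3y2 ,x3y3]
--     x3y1 x3y2 x3y3
--
--     ...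
--
--     Attributes
--     ---
--         window_list_values : list
--             Valores de la ventana a calcular.
--
--         pixel_value: int
--             Valor del píxel central.
--
--     ...
--
--     Returns
--     ---
--         Devuelve el valor LBP Uniforme asociado al pixel central
--     """
--     values = [1 if pixel > pixel_value else 0 for pixel in window_list_values]
--     values_without_center = [values[i] for i in [2, 5, 8, 7, 6, 3, 0, 1]]
--     values_changing = [value for index, value in enumerate(values_without_center) if value != values_without_center[index - 1]]
--     if len(values_changing) <= 2:
--         label = int("".join(str(a) for a in values_without_center), 2)
--     else:
--         label = -1
--
--     return label
-- ===== SOURCE B (Python) =====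
-- def _uniform_neighborhood_comparation(window_list_values: list, pixel_value: int) -> int:
--     # Accumulate the 8 neighbor bits (order 2,5,8,7,6,3,0,1, first = MSB) directly
--     # into an integer, then count circular adjacent-bit transitions with xor/popcount.
--     label = 0
--     for i in (2, 5, 8, 7, 6, 3, 0, 1):
--         label = label * 2 + (1 if window_list_values[i] > pixel_value else 0)
--     t = bin(label ^ ((label >> 1) | ((label & 1) << 7))).count('1')
--     return label if t <= 2 else -1
-- ===== Notes on version B (the rewrite author's own statement) =====
-- stated objective: faster
-- what changed: Instead of mapping the whole window to a 0/1 list, reordering it, building a transition list via Python negative indexing and parsing a joined binary string, B folds the 8 ordered comparison bits straight into the integer label and counts circular transitions with the xor/shift popcount bit trick.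
import Mathlib
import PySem

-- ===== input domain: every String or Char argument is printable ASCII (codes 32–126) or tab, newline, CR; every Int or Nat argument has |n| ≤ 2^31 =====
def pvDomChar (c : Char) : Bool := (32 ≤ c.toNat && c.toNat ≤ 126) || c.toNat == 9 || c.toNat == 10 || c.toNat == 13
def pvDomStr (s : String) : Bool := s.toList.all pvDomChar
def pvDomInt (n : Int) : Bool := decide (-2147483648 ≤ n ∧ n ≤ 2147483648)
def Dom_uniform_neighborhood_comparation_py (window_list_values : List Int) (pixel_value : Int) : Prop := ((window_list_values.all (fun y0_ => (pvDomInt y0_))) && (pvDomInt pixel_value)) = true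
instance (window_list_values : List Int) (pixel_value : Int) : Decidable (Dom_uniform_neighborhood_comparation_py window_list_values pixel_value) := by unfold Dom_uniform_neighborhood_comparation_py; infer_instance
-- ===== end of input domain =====

-- B folds the 8 ordered comparison bits into an integer and counts circular transitions
-- on the bits of that integer, instead of A's intermediate lists and binary-string parse.


-- ===== PORT A =====
def uniform_neighborhood_comparation_py (window_list_values : List Int) (pixel_value : Int) : Int :=
  let values := window_list_values.map (fun pixel => if pixel > pixel_value then (1 : Int) else 0)
  match ([2, 5, 8, 7, 6, 3, 0, 1] : List Int).mapM (fun i => PySem.List.pyGet? values i) with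
  | none => 0  -- IndexError in Python; excluded by Pre_
  | some vwc =>
    -- values_without_center[index - 1]: always in range (index 0 wraps to the last element)
    let values_changing := (PySem.List.enumerate vwc).filter
      (fun iv => iv.2 != PySem.List.pyGetD vwc (iv.1 - 1) 0)
    if (values_changing.length : Int) ≤ 2 then
      -- int("".join(str(a) for a in vwc), 2): hand port of the base-2 parse (exact: digits are "0"/"1")
      (String.join (vwc.map PySem.Int.toStr)).toList.foldl
        (fun acc c => acc * 2 + (if c = '1' then 1 else 0)) 0
    else -1

-- ===== PORT B =====
-- bin(x).count('1') for a nonnegative int: binary digits, then count '1'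
def pvPopcount (n : Nat) : Nat := (Nat.toDigits 2 n).count '1'

def uniform_neighborhood_comparation_py_alt (window_list_values : List Int) (pixel_value : Int) : Int :=
  let label := ([2, 5, 8, 7, 6, 3, 0, 1] : List Int).foldl
    (fun (acc : Int) (i : Int) => acc * 2 +
      (match PySem.List.pyGet? window_list_values i with
       | some p => if p > pixel_value then (1 : Int) else 0
       | none => 0))  -- IndexError in Python; excluded by Pre_
    (0 : Int)
  let n := label.toNat  -- label is a nonnegative 8-bit accumulator
  let t := pvPopcount (Nat.xor n ((n >>> 1) ||| ((n &&& 1) <<< 7)))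
  if t ≤ 2 then label else -1

-- ===== PRECONDITION & SPEC =====
-- Both Pythons raise IndexError when the window has fewer than 9 values; nothing else is excluded.
def Pre_uniform_neighborhood_comparation_py (window_list_values : List Int) (pixel_value : Int) : Prop :=
  9 ≤ window_list_values.length
instance (window_list_values : List Int) (pixel_value : Int) : Decidable (Pre_uniform_neighborhood_comparation_py window_list_values pixel_value) := by unfold Pre_uniform_neighborhood_comparation_py; infer_instance

def pvWitness_uniform_neighborhood_comparation_py : List Int × Int := ([5, 1, 7, 2, 4, 9, 0, 3, 8], 4)

def Spec_uniform_neighborhood_comparation_py (window_list_values : List Int) (pixel_value : Int) (out : Int) : Prop := out = uniform_neighborhood_comparation_py_alt window_list_values pixel_value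
instance (window_list_values : List Int) (pixel_value : Int) (out : Int) : Decidable (Spec_uniform_neighborhood_comparation_py window_list_values pixel_value out) := by unfold Spec_uniform_neighborhood_comparation_py; infer_instance

-- ===== CLAIM (what is proved, stated in full; the proofs are below) =====
def Claim_equal_uniform_neighborhood_comparation_py : Prop := ∀ (window_list_values : List Int) (pixel_value : Int), Dom_uniform_neighborhood_comparation_py window_list_values pixel_value → Pre_uniform_neighborhood_comparation_py window_list_values pixel_value → Spec_uniform_neighborhood_comparation_py window_list_values pixel_value (uniform_neighborhood_comparation_py window_list_values pixel_value)

-- ===== LEMMAS AND PROOFS =====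

-- With the window destructured into its first nine values, both ports reduce to closed
-- computations over the eight comparison bits; the 256 bit cases are decided one by one.
set_option maxHeartbeats 2000000 in
theorem pv_core (a b c d e f g h i : Int) (rest : List Int) (pv : Int) :
    uniform_neighborhood_comparation_py (a :: b :: c :: d :: e :: f :: g :: h :: i :: rest) pv
      = uniform_neighborhood_comparation_py_alt (a :: b :: c :: d :: e :: f :: g :: h :: i :: rest) pv := by
  have e2 : PySem.List.pyIdx? (rest.length + 1 + 1 + 1 + 1 + 1 + 1 + 1 + 1 + 1) (2:Int) = some 2 := by simp [PySem.List.pyIdx?]; omega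
  have e5 : PySem.List.pyIdx? (rest.length + 1 + 1 + 1 + 1 + 1 + 1 + 1 + 1 + 1) (5:Int) = some 5 := by simp [PySem.List.pyIdx?]; omega
  have e8 : PySem.List.pyIdx? (rest.length + 1 + 1 + 1 + 1 + 1 + 1 + 1 + 1 + 1) (8:Int) = some 8 := by simp [PySem.List.pyIdx?]; omega
  have e7 : PySem.List.pyIdx? (rest.length + 1 + 1 + 1 + 1 + 1 + 1 + 1 + 1 + 1) (7:Int) = some 7 := by simp [PySem.List.pyIdx?]; omega
  have e6 : PySem.List.pyIdx? (rest.length + 1 + 1 + 1 + 1 + 1 + 1 + 1 + 1 + 1) (6:Int) = some 6 := by simp [PySem.List.pyIdx?]; omega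
  have e3 : PySem.List.pyIdx? (rest.length + 1 + 1 + 1 + 1 + 1 + 1 + 1 + 1 + 1) (3:Int) = some 3 := by simp [PySem.List.pyIdx?]; omega
  have e0 : PySem.List.pyIdx? (rest.length + 1 + 1 + 1 + 1 + 1 + 1 + 1 + 1 + 1) (0:Int) = some 0 := by simp [PySem.List.pyIdx?]; omega
  have e1 : PySem.List.pyIdx? (rest.length + 1 + 1 + 1 + 1 + 1 + 1 + 1 + 1 + 1) (1:Int) = some 1 := by simp [PySem.List.pyIdx?]; omega
  simp [uniform_neighborhood_comparation_py, uniform_neighborhood_comparation_py_alt,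
    PySem.List.pyGet?, e2, e5, e8, e7, e6, e3, e0, e1,
    PySem.List.enumerate, PySem.List.pyGetD, PySem.Int.toStr, String.join]
  by_cases h1 : pv < c <;> by_cases h2 : pv < f <;> by_cases h3 : pv < i <;>
    by_cases h4 : pv < h <;> by_cases h5 : pv < g <;> by_cases h6 : pv < d <;>
    by_cases h7 : pv < a <;> by_cases h8 : pv < b <;>
    simp only [h1, h2, h3, h4, h5, h6, h7, h8, if_true, if_false] <;>
    decide

-- ===== VERDICT (by name: the statement is the Claim_ definition above) =====
theorem uniform_neighborhood_comparation_py_spec : Claim_equal_uniform_neighborhood_comparation_py := by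
  intro w pv _ hpre
  match w, hpre with
  | a :: b :: c :: d :: e :: f :: g :: h :: i :: rest, _ =>
    exact pv_core a b c d e f g h i rest pv
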